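-- pv_equiv track=rewrite | github.com/yashkens/belarusian_enh_dep_annotation | scripts/tokenization_aligner.py | get_additional_lists
-- ===== SOURCE A (Python) =====
-- def get_additional_lists(ind_matches):
--     all_misplaced = []
--     misplaced_groups = []
--     for key, value in ind_matches.items():
--         if len(value) > 1:
--             all_misplaced.extend(value)
--             misplaced_groups.append(value)
--     return all_misplaced, misplaced_groups
-- ===== SOURCE B (Python) =====
-- def get_additional_lists(ind_matches):
--     # Divide and conquer over the value list: split in halves, solve each half,
--     # concatenate both result components. Correct because concatenation of the
--     # per-group contributions is associative and the split preserves order.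
--     def go(values):
--         if not values:
--             return [], []
--         if len(values) == 1:
--             v = values[0]
--             if len(v) > 1:
--                 return list(v), [v]
--             return [], []
--         m = len(values) // 2
--         f1, g1 = go(values[:m])
--         f2, g2 = go(values[m:])
--         return f1 + f2, g1 + g2
--     return go(list(ind_matches.values()))
-- ===== Notes on version B (the rewrite author's own statement) =====
-- stated objective: alternative
-- what changed: Replaces A's single left-to-right loop with two forward-growing accumulators by a divide-and-conquer recursion that splits the value list in halves, solves each half independently, and concatenates the paired results.
import Mathlib
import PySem

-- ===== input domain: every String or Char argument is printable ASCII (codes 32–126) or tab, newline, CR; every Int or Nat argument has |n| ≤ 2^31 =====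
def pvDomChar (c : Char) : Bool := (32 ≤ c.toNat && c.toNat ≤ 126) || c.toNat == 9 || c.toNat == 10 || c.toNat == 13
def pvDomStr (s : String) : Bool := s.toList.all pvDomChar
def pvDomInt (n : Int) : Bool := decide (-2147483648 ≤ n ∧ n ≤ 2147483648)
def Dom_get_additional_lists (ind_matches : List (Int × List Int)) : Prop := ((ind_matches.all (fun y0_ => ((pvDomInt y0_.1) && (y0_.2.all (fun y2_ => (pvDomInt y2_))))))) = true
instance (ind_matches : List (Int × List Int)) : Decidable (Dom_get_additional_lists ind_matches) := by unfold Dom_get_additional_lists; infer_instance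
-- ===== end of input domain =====

-- B replaces A's single accumulator loop with a divide-and-conquer recursion over the value list (alternative decomposition).

-- ===== PORT A =====
-- loop over dict items, appending to two forward accumulators
def get_additional_lists (ind_matches : List (Int × List Int)) : List Int × List (List Int) :=
  ind_matches.foldl
    (fun acc kv =>
      if (kv.2.length : Int) > 1 then (acc.1 ++ kv.2, acc.2 ++ [kv.2]) else acc)
    ([], [])

-- ===== PORT B =====
-- divide and conquer: split the value list at the midpoint, recurse on both halves, concatenate the paired results
def get_additional_lists_go : List (List Int) → List Int × List (List Int)
  | [] => ([], [])
  | [v] => if (v.length : Int) > 1 then (v, [v]) else ([], [])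
  | v1 :: v2 :: t =>
    let values := v1 :: v2 :: t
    let m := values.length / 2
    let r1 := get_additional_lists_go (values.take m)
    let r2 := get_additional_lists_go (values.drop m)
    (r1.1 ++ r2.1, r1.2 ++ r2.2)
termination_by values => values.length
decreasing_by
  · simp; omega
  · simp; omega

def get_additional_lists_alt (ind_matches : List (Int × List Int)) : List Int × List (List Int) :=
  get_additional_lists_go (ind_matches.map Prod.snd)

-- ===== PRECONDITION & SPEC =====
def Spec_get_additional_lists (ind_matches : List (Int × List Int)) (out : List Int × List (List Int)) : Prop := out = get_additional_lists_alt ind_matches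
instance (ind_matches : List (Int × List Int)) (out : List Int × List (List Int)) : Decidable (Spec_get_additional_lists ind_matches out) := by unfold Spec_get_additional_lists; infer_instance

-- ===== CLAIM =====
def Claim_equal_get_additional_lists : Prop := ∀ (ind_matches : List (Int × List Int)), Dom_get_additional_lists ind_matches → Spec_get_additional_lists ind_matches (get_additional_lists ind_matches)

-- ===== LEMMAS AND PROOFS =====
-- closed characterisation of B's divide-and-conquer recursion
theorem go_eq (l : List (List Int)) :
    get_additional_lists_go l
    = ((l.filter (fun v => decide ((v.length : Int) > 1))).flatMap id,
       l.filter (fun v => decide ((v.length : Int) > 1))) := by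
  fun_induction get_additional_lists_go l with
  | case1 => simp
  | case2 v h =>
      simp [List.filter, h, List.flatMap]
  | case3 v h =>
      simp [List.filter, h]
  | case4 v1 v2 t values m r1 r2 ih1 ih2 =>
      simp only [r1, r2, ih1, ih2]
      simp
      constructor
      · rw [← List.flatten_append, ← List.filter_append, List.take_append_drop]
      · rw [← List.filter_append, List.take_append_drop]

-- closed characterisation of A's fold
theorem fold_eq (l : List (Int × List Int)) (f : List Int) (g : List (List Int)) :
    l.foldl (fun acc kv =>
      if (kv.2.length : Int) > 1 then (acc.1 ++ kv.2, acc.2 ++ [kv.2]) else acc) (f, g)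
    = (f ++ (((l.map Prod.snd).filter (fun v => decide ((v.length : Int) > 1))).flatMap id),
       g ++ ((l.map Prod.snd).filter (fun v => decide ((v.length : Int) > 1)))) := by
  induction l generalizing f g with
  | nil => simp
  | cons kv t ih =>
      rw [List.foldl_cons, List.map_cons, List.filter_cons]
      by_cases h : (kv.2.length : Int) > 1
      · rw [if_pos h, ih]; simp [h, List.flatMap]
      · rw [if_neg h, ih]; simp [h]

-- ===== VERDICT =====
theorem get_additional_lists_spec : Claim_equal_get_additional_lists := by
  intro l _
  unfold Spec_get_additional_lists get_additional_lists get_additional_lists_alt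
  rw [fold_eq, go_eq]
  simp
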